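-- pv_equiv track=rewrite | github.com/GaloisTheory/global-cot-analysis | scripts/playground/playground_utils.py | build_position_index
-- ===== SOURCE A (Python) =====
-- from collections import Counter, defaultdict
-- from typing import Any, Dict, List, Optional, Tuple
--
-- def build_position_index(
--     rollouts: List[Dict[str, Any]],
-- ) -> Dict[int, List[Tuple[int, str]]]:
--     """Build ``pos -> [(rollout_idx, sentence)]`` mapping.
--
--     Only includes positions that have at least one sentence across rollouts.
--     """
--     index: Dict[int, List[Tuple[int, str]]] = defaultdict(list)
--     for ridx, r in enumerate(rollouts):
--         for pos, sent in enumerate(r["sentences"]):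
--             index[pos].append((ridx, sent))
--     return dict(index)
-- ===== SOURCE B (Python) =====
-- def build_position_index(rollouts):
--     """Column-major: compute the width once, then build each position's column directly."""
--     cols_src = [r["sentences"] for r in rollouts]
--     width = max(map(len, cols_src), default=0)
--     return {
--         pos: [(ridx, sents[pos]) for ridx, sents in enumerate(cols_src) if pos < len(sents)]
--         for pos in range(width)
--     }
-- ===== Notes on version B (the rewrite author's own statement) =====
-- stated objective: alternative
-- what changed: B replaces A's row-major defaultdict accumulation (append (ridx, sent) per sentence) with a column-major transpose: it computes the width (max sentence count) once and builds each position's column in a single comprehension per position.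
import Mathlib
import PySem

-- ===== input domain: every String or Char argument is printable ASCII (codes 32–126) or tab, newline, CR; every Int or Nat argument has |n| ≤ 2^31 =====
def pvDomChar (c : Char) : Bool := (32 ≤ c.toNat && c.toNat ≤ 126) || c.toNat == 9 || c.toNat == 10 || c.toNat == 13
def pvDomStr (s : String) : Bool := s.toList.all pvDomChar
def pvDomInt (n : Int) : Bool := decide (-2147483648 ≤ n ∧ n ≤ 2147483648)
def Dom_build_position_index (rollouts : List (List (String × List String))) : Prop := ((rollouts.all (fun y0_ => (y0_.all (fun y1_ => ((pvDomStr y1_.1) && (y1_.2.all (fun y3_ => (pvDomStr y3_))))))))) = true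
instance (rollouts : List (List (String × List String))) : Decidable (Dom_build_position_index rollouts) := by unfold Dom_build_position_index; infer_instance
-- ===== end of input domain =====

-- B builds the index column-major (one column per position, width computed once)
-- instead of A's row-major defaultdict accumulation; objective: alternative decomposition.

-- shared helper: r["sentences"] (first match in the association list; [] only outside Pre_)
def pvSents (r : List (String × List String)) : List String :=
  ((PySem.Dict.mk r).get? "sentences").getD []

-- ===== PORT A =====
def build_position_index (rollouts : List (List (String × List String))) : List (Int × List (Int × String)) :=
  let index : PySem.Dict Int (List (Int × String)) :=
    (PySem.List.enumerate rollouts).foldl (fun idx p =>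
      (PySem.List.enumerate (pvSents p.2)).foldl
        (fun idx q => PySem.Dict.modify idx q.1 [] (fun l => l ++ [(p.1, q.2)])) idx)
      PySem.Dict.empty
  index.items

-- ===== PORT B =====
def build_position_index_alt (rollouts : List (List (String × List String))) : List (Int × List (Int × String)) :=
  let colsSrc := rollouts.map pvSents
  let width := colsSrc.foldl (fun m s => max m s.length) 0
  (List.range width).map (fun pos =>
    (((pos : Nat) : Int),
     (PySem.List.enumerate colsSrc).filterMap (fun q =>
       if h : pos < q.2.length then some (q.1, q.2[pos]) else none)))

-- ===== PRECONDITION & SPEC =====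
-- Pre_ excludes exactly the inputs where some rollout lacks the "sentences" key, on which A raises KeyError.
def Pre_build_position_index (rollouts : List (List (String × List String))) : Prop :=
  ∀ r ∈ rollouts, "sentences" ∈ r.map (·.1)
instance (rollouts : List (List (String × List String))) : Decidable (Pre_build_position_index rollouts) := by unfold Pre_build_position_index; infer_instance
def pvWitness_build_position_index : (List (List (String × List String))) :=
  [[("sentences", ["a", "b"])], [("sentences", ["c"])], [("sentences", [])]]
def Spec_build_position_index (rollouts : List (List (String × List String))) (out : List (Int × List (Int × String))) : Prop := out = build_position_index_alt rollouts
instance (rollouts : List (List (String × List String))) (out : List (Int × List (Int × String))) : Decidable (Spec_build_position_index rollouts out) := by unfold Spec_build_position_index; infer_instance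

-- ===== CLAIM (what is proved, stated in full; the proofs are below) =====
def Claim_equal_build_position_index : Prop := ∀ (rollouts : List (List (String × List String))), Dom_build_position_index rollouts → Pre_build_position_index rollouts → Spec_build_position_index rollouts (build_position_index rollouts)

-- ===== LEMMAS AND PROOFS =====

-- the flattened stream of (pos, (ridx, sent)) pairs A feeds its defaultdict, starting at rollout index s
def pvFlat (rollouts : List (List (String × List String))) (s : Int) : List (Int × (Int × String)) :=
  (PySem.List.enumerate rollouts s).flatMap (fun p =>
    (PySem.List.enumerate (pvSents p.2)).map (fun q => (q.1, (p.1, q.2))))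

-- [0, 1, ..., m-1] as Ints
def pvR (m : Nat) : List Int := (List.range m).map (fun k => ((k : Nat) : Int))

def pvStep (d : PySem.Dict Int (List (Int × String))) (x : Int × (Int × String)) : PySem.Dict Int (List (Int × String)) :=
  PySem.Dict.modify d x.1 [] (fun l => l ++ [x.2])

-- A's nested fold is the flat fold over pvFlat
theorem pvFoldFlat (rollouts : List (List (String × List String))) (s : Int)
    (d : PySem.Dict Int (List (Int × String))) :
    (PySem.List.enumerate rollouts s).foldl (fun idx p =>
      (PySem.List.enumerate (pvSents p.2)).foldl
        (fun idx q => PySem.Dict.modify idx q.1 [] (fun l => l ++ [(p.1, q.2)])) idx) d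
    = (pvFlat rollouts s).foldl pvStep d := by
  induction rollouts generalizing s d with
  | nil => simp [pvFlat, PySem.List.enumerate_nil]
  | cons r rs ih =>
      simp only [pvFlat, PySem.List.enumerate_cons, List.flatMap_cons, List.foldl_cons,
        List.foldl_append, List.foldl_map] at *
      rw [ih]
      rfl

theorem pvMemR (x : Int) (m : Nat) : x ∈ pvR m ↔ ∃ k : Nat, k < m ∧ x = (k : Int) := by
  simp [pvR, List.mem_map, List.mem_range]
  constructor
  · rintro ⟨k, hk, rfl⟩; exact ⟨k, hk, rfl⟩
  · rintro ⟨k, hk, rfl⟩; exact ⟨k, hk, rfl⟩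

theorem pvUpdateR (m n : Nat) : PySem.Set.update (pvR m) (pvR n) = pvR (max m n) := by
  induction n with
  | zero => simp [pvR, PySem.Set.update]
  | succ n ih =>
      have h1 : pvR (n + 1) = pvR n ++ [(n : Int)] := by
        simp [pvR, List.range_succ]
      rw [h1, PySem.Set.update_append]
      have h2 : PySem.Set.update (pvR (max m n)) [(n : Int)] = PySem.Set.add (pvR (max m n)) (n : Int) := by
        simp [PySem.Set.update_cons, PySem.Set.update_nil]
      rw [ih, h2]
      by_cases hmn : n < m
      · have hmem : (n : Int) ∈ pvR (max m n) := by
          rw [pvMemR]; exact ⟨n, by omega, rfl⟩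
        rw [PySem.Set.add_of_mem hmem]
        have : max m (n + 1) = max m n := by omega
        rw [this]
      · have hnot : (n : Int) ∉ pvR (max m n) := by
          rw [pvMemR]; rintro ⟨k, hk, he⟩
          have : n = k := by exact_mod_cast he
          omega
        rw [PySem.Set.add_of_not_mem hnot]
        have hmx : max m n = n := by omega
        have hmx2 : max m (n + 1) = n + 1 := by omega
        rw [hmx, hmx2]
        simp [pvR, List.range_succ]

def pvWidth (rollouts : List (List (String × List String))) : Nat :=
  (rollouts.map pvSents).foldl (fun m s => max m s.length) 0

theorem pvKeysR (rollouts : List (List (String × List String))) :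
    PySem.Set.ofList ((pvFlat rollouts 0).map (fun x => x.1)) = pvR (pvWidth rollouts) := by
  induction rollouts using List.reverseRecOn with
  | nil => simp [pvFlat, pvWidth, pvR, PySem.List.enumerate_nil]
  | append_singleton rs r ih =>
      have hflat : pvFlat (rs ++ [r]) 0 = pvFlat rs 0 ++
          (PySem.List.enumerate (pvSents r)).map (fun q => (q.1, (((0 : Int) + rs.length), q.2))) := by
        rw [pvFlat, PySem.List.enumerate_append, List.flatMap_append, ← pvFlat]
        simp [PySem.List.enumerate_cons, PySem.List.enumerate_nil]
      have hfst : ((PySem.List.enumerate (pvSents r)).map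
          (fun q : Int × String => (q.1, (((0 : Int) + rs.length), q.2)))).map (fun x => x.1)
          = pvR (pvSents r).length := by
        rw [List.map_map]
        have : ((fun x : Int × (Int × String) => x.1) ∘
            (fun q : Int × String => (q.1, (((0 : Int) + rs.length), q.2)))) = (fun q : Int × String => q.1) := rfl
        rw [this]
        have hm := PySem.List.map_fst_enumerate (pvSents r) 0
        rw [hm, PySem.List.pyRange_one]
        simp [pvR]
      have hw : pvWidth (rs ++ [r]) = max (pvWidth rs) (pvSents r).length := by
        simp [pvWidth, List.foldl_append]
      rw [hflat, List.map_append, PySem.Set.ofList_append, hfst, ih, pvUpdateR, hw]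

theorem pvFilterEnumLt {a : Type} (l : List a) (s b : Int) (hb : b < s) :
    (PySem.List.enumerate l s).filter (fun q => q.1 == b) = [] := by
  rw [List.filter_eq_nil_iff]
  intro q hq
  rw [PySem.List.mem_enumerate_iff] at hq
  obtain ⟨k, hk, rfl⟩ := hq
  simp only [beq_iff_eq]
  omega

theorem pvFilterEnum {a : Type} (l : List a) (t p : Nat) :
    (PySem.List.enumerate l ((t : Nat) : Int)).filter (fun q => q.1 == (((t + p : Nat)) : Int)) =
      (if h : p < l.length then [((((t + p : Nat)) : Int), l[p])] else []) := by
  induction l generalizing t p with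
  | nil => simp
  | cons x xs ih =>
      rw [PySem.List.enumerate_cons]
      cases p with
      | zero =>
          simp only [List.filter_cons]
          have hb : ((t : Int) == ((t + 0 : Nat) : Int)) = true := by simp
          rw [hb]
          have ht : ((t + 0 : Nat) : Int) < (t : Int) + 1 := by push_cast; omega
          rw [pvFilterEnumLt xs _ _ ht]
          simp
      | succ k =>
          simp only [List.filter_cons]
          have hb : ((t : Int) == ((t + (k + 1) : Nat) : Int)) = false := by
            simp; omega
          rw [hb]
          have e1 : ((t : Int) + 1) = (((t + 1 : Nat)) : Int) := by push_cast; ring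
          have e2 : (((t + (k + 1) : Nat)) : Int) = ((((t + 1) + k : Nat)) : Int) := by push_cast; ring
          rw [if_neg (by simp), e1, e2, ih (t + 1) k]
          by_cases h : k < xs.length
          · rw [dif_pos h, dif_pos (by simpa using Nat.succ_lt_succ h)]
            simp
          · rw [dif_neg h, dif_neg (by simpa using fun hh => h (Nat.lt_of_succ_lt_succ hh))]

theorem pvCol (rollouts : List (List (String × List String))) (s : Int) (p : Nat) :
    ((pvFlat rollouts s).filter (fun x => x.1 == ((p : Nat) : Int))).map (fun x => x.2)
    = (PySem.List.enumerate (rollouts.map pvSents) s).filterMap (fun q =>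
        if h : p < q.2.length then some (q.1, q.2[p]) else none) := by
  induction rollouts generalizing s with
  | nil => simp [pvFlat, PySem.List.enumerate_nil]
  | cons r rs ih =>
      rw [pvFlat, PySem.List.enumerate_cons, List.flatMap_cons]
      rw [List.map_cons, PySem.List.enumerate_cons, List.filterMap_cons]
      rw [List.filter_append, List.map_append, List.filter_map]
      have hcomp : ((fun x : Int × (Int × String) => x.1 == ((p : Nat) : Int)) ∘
          (fun q : Int × String => (q.1, (s, q.2)))) = (fun q : Int × String => q.1 == ((p : Nat) : Int)) := by
        funext q; rfl
      rw [hcomp]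
      have h0 : ((0 : Nat) : Int) = (0 : Int) := rfl
      have hfe := pvFilterEnum (pvSents r) 0 p
      simp only [Nat.zero_add] at hfe
      rw [show PySem.List.enumerate (pvSents r) = PySem.List.enumerate (pvSents r) ((0 : Nat) : Int) from rfl, hfe]
      rw [← pvFlat, ih (s + 1)]
      by_cases h : p < (pvSents r).length
      · rw [dif_pos h, dif_pos h]
        simp
      · rw [dif_neg h, dif_neg h]
        simp

theorem pvMain (rollouts : List (List (String × List String))) :
    build_position_index rollouts = build_position_index_alt rollouts := by
  have hstep : pvStep = fun d (x : Int × (Int × String)) =>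
      PySem.Dict.modify d x.1 [] (fun l => l ++ [x.2]) := rfl
  have hA : build_position_index rollouts
      = ((pvFlat rollouts 0).foldl pvStep PySem.Dict.empty).items := by
    unfold build_position_index
    rw [pvFoldFlat]
  have hnd : ((pvFlat rollouts 0).foldl pvStep PySem.Dict.empty).keys.Nodup := by
    rw [hstep]
    exact PySem.Dict.nodup_keys_foldl_modify_key (pvFlat rollouts 0) (fun x => x.1) []
      (fun d x => fun l => l ++ [x.2]) PySem.Dict.empty (by simp)
  have hkeys : ((pvFlat rollouts 0).foldl pvStep PySem.Dict.empty).keys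
      = pvR (pvWidth rollouts) := by
    rw [hstep, PySem.Dict.keys_foldl_modify_key]
    rw [PySem.Dict.keys_empty, PySem.Set.update_nil_left]
    exact pvKeysR rollouts
  have hget : ∀ n : Nat, ((pvFlat rollouts 0).foldl pvStep PySem.Dict.empty).getD ((n : Nat) : Int) []
      = (PySem.List.enumerate (rollouts.map pvSents) 0).filterMap (fun q =>
          if h : n < q.2.length then some (q.1, q.2[n]) else none) := by
    intro n
    rw [hstep, PySem.Dict.getD_foldl_modify_append, PySem.Dict.getD_empty]
    rw [List.nil_append]
    exact pvCol rollouts 0 n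
  rw [hA, PySem.Dict.items_eq_map_keys _ hnd [], hkeys]
  unfold build_position_index_alt pvR
  rw [List.map_map]
  refine List.map_congr_left ?_
  intro n _
  simp only [Function.comp]
  exact congrArg (fun z => (((n : Nat) : Int), z)) (hget n)

-- ===== VERDICT (by name: the statement is the Claim_ definition above) =====
theorem build_position_index_spec : Claim_equal_build_position_index := by
  intro rollouts _ _
  unfold Spec_build_position_index
  exact pvMain rollouts
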